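-- pv_equiv track=rewrite | github.com/roderickmackenzie/gpvdm_gui | gui/inp.py | inp_get_next_token_array
-- ===== SOURCE A (Python) =====
-- def inp_get_next_token_array(lines,start):
-- 	"""Get the next token"""
-- 	ret=[]
-- 	if start>=len(lines):
-- 		return None,start
--
-- 	for i in range(start,len(lines)):
-- 		if i!=start:
-- 			if len(lines[i])>0:
-- 				if lines[i][0]=="#":
-- 					break
--
-- 		ret.append(lines[i])
--
--
-- 	return ret,i
-- ===== SOURCE B (Python) =====
-- def inp_get_next_token_array(lines, start):
-- 	"""Get the next token"""
-- 	n = len(lines)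
-- 	if start >= n:
-- 		return None, start
-- 	b = next((j for j in range(start + 1, n)
-- 	          if len(lines[j]) > 0 and lines[j][0] == "#"), None)
-- 	if b is None:
-- 		return [lines[k] for k in range(start, n)], n - 1
-- 	return [lines[k] for k in range(start, b)], b
-- ===== Notes on version B (the rewrite author's own statement) =====
-- stated objective: simpler
-- what changed: Replaces the append-per-iteration loop with break-state tracking by a single boundary search (first comment line after start) followed by one index-range comprehension building the whole block at once.
import Mathlib
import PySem

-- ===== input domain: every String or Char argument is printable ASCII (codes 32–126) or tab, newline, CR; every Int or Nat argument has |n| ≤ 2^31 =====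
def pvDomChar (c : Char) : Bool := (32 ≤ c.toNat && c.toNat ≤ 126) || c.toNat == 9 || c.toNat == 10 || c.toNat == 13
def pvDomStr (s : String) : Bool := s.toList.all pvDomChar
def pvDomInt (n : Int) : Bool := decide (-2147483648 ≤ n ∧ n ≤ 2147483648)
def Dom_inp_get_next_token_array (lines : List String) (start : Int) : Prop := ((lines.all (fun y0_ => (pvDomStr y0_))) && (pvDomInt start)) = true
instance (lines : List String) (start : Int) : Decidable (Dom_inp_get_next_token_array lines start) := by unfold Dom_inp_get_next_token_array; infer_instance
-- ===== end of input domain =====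

-- B replaces A's append-per-line loop with a boundary search followed by one slice-like
-- comprehension (objective: simpler). Equivalence is on the return value; neither mutates.

-- ===== PORT A =====
-- lines[i] (may be negative; none = IndexError, excluded by Pre_): defaulting to "" outside Pre_
def pvLineAt (lines : List String) (i : Int) : String :=
  (PySem.List.pyGet? lines i).getD ""

-- the for-loop: idxs = remaining range(start, len(lines)) indices, ret the accumulator, i the loop variable's last value
def pvALoop (lines : List String) (start : Int) (ret : List String) (i : Int) :
    List Int → Option (List String) × Int
  | [] => (some ret, i)
  | j :: rest =>
    if j ≠ start ∧ PySem.Str.len (pvLineAt lines j) > 0 ∧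
        PySem.Str.pyGet? (pvLineAt lines j) 0 = some '#' then
      (some ret, j)                                   -- break
    else
      pvALoop lines start (ret ++ [pvLineAt lines j]) j rest

def inp_get_next_token_array (lines : List String) (start : Int) : Option (List String) × Int :=
  if start ≥ (lines.length : Int) then (none, start)
  else pvALoop lines start [] start (PySem.List.pyRange start lines.length 1)

-- ===== PORT B =====
-- the boundary test: line j exists, is nonempty and starts with '#'
def pvIsComment (lines : List String) (j : Int) : Bool :=
  decide (PySem.Str.len (pvLineAt lines j) > 0 ∧
          PySem.Str.pyGet? (pvLineAt lines j) 0 = some '#')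

def inp_get_next_token_array_alt (lines : List String) (start : Int) : Option (List String) × Int :=
  let n : Int := lines.length
  if start ≥ n then (none, start)
  else
    match (PySem.List.pyRange (start + 1) n 1).find? (pvIsComment lines) with
    | none   => (some ((PySem.List.pyRange start n 1).map (pvLineAt lines)), n - 1)
    | some b => (some ((PySem.List.pyRange start b 1).map (pvLineAt lines)), b)

-- ===== PRECONDITION & SPEC =====
-- Pre_ excludes exactly the inputs where Python raises IndexError (start < -len(lines)
-- while start < len(lines)); both A and B raise there.
def Pre_inp_get_next_token_array (lines : List String) (start : Int) : Prop :=
  -(lines.length : Int) ≤ start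
instance (lines : List String) (start : Int) : Decidable (Pre_inp_get_next_token_array lines start) := by unfold Pre_inp_get_next_token_array; infer_instance

def pvWitness_inp_get_next_token_array : List String × Int := (["a", "#b", "c"], 0)

def Spec_inp_get_next_token_array (lines : List String) (start : Int) (out : Option (List String) × Int) : Prop := out = inp_get_next_token_array_alt lines start
instance (lines : List String) (start : Int) (out : Option (List String) × Int) : Decidable (Spec_inp_get_next_token_array lines start out) := by unfold Spec_inp_get_next_token_array; infer_instance

-- ===== CLAIM (what is proved, stated in full; the proofs are below) =====
def Claim_equal_inp_get_next_token_array : Prop := ∀ (lines : List String) (start : Int), Dom_inp_get_next_token_array lines start → Pre_inp_get_next_token_array lines start → Spec_inp_get_next_token_array lines start (inp_get_next_token_array lines start)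

-- ===== LEMMAS AND PROOFS =====

-- Loop invariant: from position a (start < a ≤ n), with loop variable i = a - 1 and the
-- block gathered so far in ret, A's loop equals B's boundary-search-then-map shape.
theorem pvALoop_eq (lines : List String) (start : Int) :
    ∀ (k : Nat) (a : Int) (ret : List String), start < a → a ≤ (lines.length : Int) →
    ((lines.length : Int) - a).toNat = k →
    pvALoop lines start ret (a - 1) (PySem.List.pyRange a lines.length 1) =
      match (PySem.List.pyRange a lines.length 1).find? (pvIsComment lines) with
      | none   => (some (ret ++ (PySem.List.pyRange a lines.length 1).map (pvLineAt lines)),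
                   (lines.length : Int) - 1)
      | some b => (some (ret ++ (PySem.List.pyRange a b 1).map (pvLineAt lines)), b) := by
  intro k
  induction k with
  | zero =>
    intro a ret hlt hle hk
    have ha : a = (lines.length : Int) := by omega
    subst ha
    rw [PySem.List.pyRange_one_eq_nil le_rfl]
    simp [pvALoop]
  | succ k ih =>
    intro a ret hlt hle hk
    have halt : a < (lines.length : Int) := by omega
    rw [PySem.List.pyRange_one_cons halt]
    by_cases hc : PySem.Str.len (pvLineAt lines a) > 0 ∧
        PySem.Str.pyGet? (pvLineAt lines a) 0 = some '#'
    · have hb : pvIsComment lines a = true := by unfold pvIsComment; exact decide_eq_true hc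
      have hcond : a ≠ start ∧ PySem.Str.len (pvLineAt lines a) > 0 ∧
          PySem.Str.pyGet? (pvLineAt lines a) 0 = some '#' := ⟨by omega, hc⟩
      rw [pvALoop, if_pos hcond]
      rw [List.find?_cons_of_pos hb]
      simp [PySem.List.pyRange_one_eq_nil (le_refl a)]
    · have hb : pvIsComment lines a = false := by unfold pvIsComment; exact decide_eq_false hc
      have hcond : ¬ (a ≠ start ∧ PySem.Str.len (pvLineAt lines a) > 0 ∧
          PySem.Str.pyGet? (pvLineAt lines a) 0 = some '#') := by tauto
      rw [pvALoop, if_neg hcond]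
      have hih := ih (a + 1) (ret ++ [pvLineAt lines a]) (by omega) (by omega) (by omega)
      rw [show (a : Int) + 1 - 1 = a from by omega] at hih
      rw [hih]
      rw [List.find?_cons_of_neg (by simp [hb])]
      cases hf : (PySem.List.pyRange (a + 1) lines.length 1).find? (pvIsComment lines) with
      | none => simp
      | some b =>
        have hmem : b ∈ PySem.List.pyRange (a + 1) lines.length 1 :=
          List.mem_of_find?_eq_some hf
        have hab : a < b := by
          have := (PySem.List.mem_pyRange_one.mp hmem).1; omega
        simp [PySem.List.pyRange_one_cons hab]

theorem inp_get_next_token_array_spec : Claim_equal_inp_get_next_token_array := by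
  intro lines start _hdom _hpre
  unfold Spec_inp_get_next_token_array
  unfold inp_get_next_token_array inp_get_next_token_array_alt
  by_cases hge : start ≥ (lines.length : Int)
  · simp [hge]
  · have hlt : start < (lines.length : Int) := by omega
    rw [if_neg hge]
    simp only
    rw [if_neg hge]
    rw [PySem.List.pyRange_one_cons hlt]
    have hcond : ¬ (start ≠ start ∧ PySem.Str.len (pvLineAt lines start) > 0 ∧
        PySem.Str.pyGet? (pvLineAt lines start) 0 = some '#') := by tauto
    rw [pvALoop, if_neg hcond]
    have hmain := pvALoop_eq lines start (((lines.length : Int) - (start + 1)).toNat)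
      (start + 1) ([] ++ [pvLineAt lines start]) (by omega) (by omega) rfl
    rw [show (start : Int) + 1 - 1 = start from by omega] at hmain
    rw [hmain]
    cases hf : (PySem.List.pyRange (start + 1) lines.length 1).find? (pvIsComment lines) with
    | none => simp
    | some b =>
      have hmem : b ∈ PySem.List.pyRange (start + 1) lines.length 1 :=
        List.mem_of_find?_eq_some hf
      have hab : start < b := by
        have := (PySem.List.mem_pyRange_one.mp hmem).1; omega
      simp [PySem.List.pyRange_one_cons hab]

-- ===== VERDICT: the theorem above states Claim_equal_inp_get_next_token_array by name =====
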